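-- pv_equiv track=rewrite | github.com/wherby/code | algorithm/mathA/kthPermutation/kthPermutationBasic.py | fromPermutaionGetKth
-- ===== SOURCE A (Python) =====
-- from collections import Counter
-- import math
--
-- def perm(arr):
--     c=Counter(arr)
--     sz = len(arr)
--     res = 1
--     for v in c.values():
--         res *= math.comb(sz,v)
--         sz -= v
--     return res
--
-- def fromPermutaionGetKth(arr):
--     n = len(arr)
--     def getIdxPerm(idx):
--         if idx == n:
--             return 1
--         acc = 0
--         arrTmp= list(arr[idx:])
--         ks = set(arrTmp)
--         ks=sorted(list(ks))
--         for k in ks: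
--             if k < arr[idx]:
--                 arrTmp.remove(k)
--                 acc += perm(arrTmp)
--                 arrTmp.append(k)
--             elif k == arr[idx]:
--                 return acc + getIdxPerm(idx+1)
--     return getIdxPerm(0)
-- ===== SOURCE B (Python) =====
-- from collections import Counter
-- import math
--
-- def fromPermutaionGetKth(arr):
--     # One pass: keep the multiset-permutation count `total` of the remaining
--     # suffix and a count table, updating both incrementally per position.
--     n = len(arr)
--     cnt = Counter(arr)
--     total = math.factorial(n)
--     for v in cnt.values():
--         total //= math.factorial(v)
--     rank = 1
--     m = n
--     for x in arr:
--         smaller = sum(c for k, c in cnt.items() if k < x)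
--         rank += total * smaller // m
--         total = total * cnt[x] // m
--         m -= 1
--         cnt[x] -= 1
--     return rank
-- ===== Notes on version B (the rewrite author's own statement) =====
-- stated objective: faster
-- what changed: Instead of recomputing Counter+sorted-set and a full multinomial for every candidate at every position (A), B makes one pass keeping the multiset-permutation count of the remaining suffix and a count table, updating both incrementally per position with exact integer divisions.
import Mathlib
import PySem

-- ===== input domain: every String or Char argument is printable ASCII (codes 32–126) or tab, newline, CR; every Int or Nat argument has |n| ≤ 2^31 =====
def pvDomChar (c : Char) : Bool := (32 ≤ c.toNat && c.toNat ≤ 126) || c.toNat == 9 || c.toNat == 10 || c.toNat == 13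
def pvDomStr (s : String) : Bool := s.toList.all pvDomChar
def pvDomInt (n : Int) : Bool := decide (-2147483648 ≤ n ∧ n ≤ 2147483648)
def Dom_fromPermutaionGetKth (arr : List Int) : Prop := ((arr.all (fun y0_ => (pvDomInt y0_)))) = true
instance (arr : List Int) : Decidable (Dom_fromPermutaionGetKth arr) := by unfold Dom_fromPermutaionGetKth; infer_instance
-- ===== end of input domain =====

-- B replaces A's per-position recomputation (Counter + sorted set + one multinomial per
-- smaller candidate) by a single pass that updates the suffix multiset-permutation count
-- and a count table incrementally (objective: faster; measured).

-- ===== PORT A =====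

-- perm(arr): math.comb(sz, v) is ported as Nat.choose on .toNat — exact here because both
-- arguments are nonnegative wherever perm is called (counts, and the remaining size).
def permA (l : List Int) : Int :=
  let c := PySem.Dict.counter l
  (c.values.foldl (fun (st : Int × Int) v =>
      (st.1 * ((Nat.choose st.2.toNat v.toNat : Nat) : Int), st.2 - v))
    (1, (l.length : Int))).1

-- the inner 'for k in ks' loop of getIdxPerm; `rec` is the (pure) value of
-- getIdxPerm(idx+1), passed in by the caller.  Falling off the loop end returns none
-- (Python would return None), as does a ValueError of arrTmp.remove (unreachable: k ∈ arrTmp).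
def getIdxLoopA (x : Int) (rec : Option Int) : List Int → Int → List Int → Option Int
  | [], _, _ => none
  | k :: ks, acc, arrTmp =>
    if k < x then
      match PySem.List.remove? arrTmp k with
      | none => none
      | some arrTmp' => getIdxLoopA x rec ks (acc + permA arrTmp') (arrTmp' ++ [k])
    else if k = x then rec.map (fun r => acc + r)
    else getIdxLoopA x rec ks acc arrTmp

-- getIdxPerm(idx); fuel is only a totality guard for the idx+1 recursion (called with
-- fuel = n+1, so the 0-fuel branch is never reached).
def getIdxPermA (arr : List Int) : Nat → Nat → Option Int
  | 0, _ => none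
  | fuel+1, idx =>
    if idx = arr.length then some 1
    else
      match PySem.List.pyGet? arr (idx : Int) with
      | none => none
      | some x =>
        let arrTmp := PySem.List.slice arr (some (idx : Int)) none
        let ks := PySem.List.sorted (PySem.Set.ofList arrTmp) (fun y => y) false
        getIdxLoopA x (getIdxPermA arr fuel (idx+1)) ks 0 arrTmp

-- A returns getIdxPerm(0); that is always a number on reachable paths (.getD 0 only
-- discharges the Option of the unreachable none branches).
def fromPermutaionGetKth (arr : List Int) : Int :=
  (getIdxPermA arr (arr.length + 1) 0).getD 0

-- ===== PORT B =====

-- the body of B's 'for x in arr' loop, state (rank, total, m, cnt)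
def stepB (st : Int × Int × Int × PySem.Dict Int Int) (x : Int) :
    Int × Int × Int × PySem.Dict Int Int :=
  let rank := st.1
  let total := st.2.1
  let m := st.2.2.1
  let cnt := st.2.2.2
  let smaller := cnt.items.foldl (fun acc p => if p.1 < x then acc + p.2 else acc) 0
  let rank := rank + PySem.Int.floordiv (total * smaller) m
  let total := PySem.Int.floordiv (total * cnt.getD x 0) m
  let m := m - 1
  let cnt := cnt.modify x 0 (fun c => c - 1)
  (rank, total, m, cnt)

-- math.factorial(v): v is a count from cnt.values, hence nonnegative; .toNat is exact.
def fromPermutaionGetKth_alt (arr : List Int) : Int :=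
  let n := arr.length
  let cnt := PySem.Dict.counter arr
  let total : Int := cnt.values.foldl
    (fun t v => PySem.Int.floordiv t ((Nat.factorial v.toNat : Nat) : Int))
    ((Nat.factorial n : Nat) : Int)
  (arr.foldl stepB (1, total, (n : Int), cnt)).1

-- ===== PRECONDITION & SPEC =====
def Spec_fromPermutaionGetKth (arr : List Int) (out : Int) : Prop := out = fromPermutaionGetKth_alt arr
instance (arr : List Int) (out : Int) : Decidable (Spec_fromPermutaionGetKth arr out) := by unfold Spec_fromPermutaionGetKth; infer_instance

-- ===== CLAIM (what is proved, stated in full; the proofs are below) =====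
def Claim_equal_fromPermutaionGetKth : Prop := ∀ (arr : List Int), Dom_fromPermutaionGetKth arr → Spec_fromPermutaionGetKth arr (fromPermutaionGetKth arr)

-- ===== LEMMAS AND PROOFS =====

-- product of count-factorials of l (the denominator of the multinomial coefficient)
def Fct (l : List Int) : Nat := ∏ k ∈ l.toFinset, (List.count k l).factorial

-- number of distinct permutations of the multiset l
def Mm (l : List Int) : Nat := l.length.factorial / Fct l

-- per-position sums of counts of strictly smaller first choices (= rank − 1)
def contribSum : List Int → Nat
  | [] => 0
  | x :: t => (∑ k ∈ (x::t).toFinset.filter (fun k => k < x), Mm ((x::t).erase k)) + contribSum t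

lemma Fct_pos (l : List Int) : 0 < Fct l := by
  unfold Fct; exact Finset.prod_pos (fun k _ => Nat.factorial_pos _)

lemma Fct_dvd (l : List Int) : Fct l ∣ l.length.factorial := by
  unfold Fct
  have h := Nat.prod_factorial_dvd_factorial_sum l.toFinset (fun k => List.count k l)
  rwa [List.sum_toFinset_count_eq_length] at h

lemma Mm_mul_Fct (l : List Int) : Mm l * Fct l = l.length.factorial :=
  Nat.div_mul_cancel (Fct_dvd l)

lemma Fct_perm {l l' : List Int} (h : l.Perm l') : Fct l = Fct l' := by
  unfold Fct
  rw [List.toFinset_eq_of_perm l l' h]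
  exact Finset.prod_congr rfl (fun k _ => by rw [h.count_eq])

lemma Mm_perm {l l' : List Int} (h : l.Perm l') : Mm l = Mm l' := by
  unfold Mm; rw [h.length_eq, Fct_perm h]

lemma Fct_erase {l : List Int} {x : Int} (hx : x ∈ l) :
    Fct l = Fct (l.erase x) * List.count x l := by
  unfold Fct
  have hcnt : ∀ k : Int, k ≠ x → List.count k (l.erase x) = List.count k l := by
    intro k hk; exact List.count_erase_of_ne hk
  have hcx : List.count x (l.erase x) = List.count x l - 1 := List.count_erase_self ..
  have hpos : 0 < List.count x l := List.count_pos_iff.mpr hx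
  by_cases h1 : List.count x l = 1
  · -- x removed entirely: toFinset (l.erase x) = l.toFinset.erase x
    have htf : (l.erase x).toFinset = l.toFinset.erase x := by
      ext k
      simp only [List.mem_toFinset, Finset.mem_erase]
      constructor
      · intro hkm
        refine ⟨?_, List.mem_of_mem_erase hkm⟩
        rintro rfl
        have := List.count_pos_iff.mpr hkm
        omega
      · rintro ⟨hne, hkm⟩
        have : 0 < List.count k (l.erase x) := by rw [hcnt k hne]; exact List.count_pos_iff.mpr hkm
        exact List.count_pos_iff.mp this
    rw [htf, h1]
    rw [← Finset.mul_prod_erase l.toFinset _ (List.mem_toFinset.mpr hx), h1]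
    simp only [Nat.factorial_one, one_mul, mul_one]
    exact Finset.prod_congr rfl (fun k hk => by
      rw [hcnt k (Finset.mem_erase.mp hk).1])
  · have htf : (l.erase x).toFinset = l.toFinset := by
      ext k
      simp only [List.mem_toFinset]
      constructor
      · exact List.mem_of_mem_erase
      · intro hkm
        by_cases hk : k = x
        · subst hk
          have : 0 < List.count k (l.erase k) := by omega
          exact List.count_pos_iff.mp this
        · have : 0 < List.count k (l.erase x) := by rw [hcnt k hk]; exact List.count_pos_iff.mpr hkm
          exact List.count_pos_iff.mp this
    rw [htf]
    rw [← Finset.mul_prod_erase l.toFinset _ (List.mem_toFinset.mpr hx),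
        ← Finset.mul_prod_erase l.toFinset _ (List.mem_toFinset.mpr hx)]
    have hrest : ∀ k ∈ l.toFinset.erase x,
        List.count k (l.erase x) = List.count k l := fun k hk => hcnt k (Finset.mem_erase.mp hk).1
    have hP : (∏ k ∈ l.toFinset.erase x, (List.count k (l.erase x)).factorial)
        = ∏ k ∈ l.toFinset.erase x, (List.count k l).factorial :=
      Finset.prod_congr rfl (fun k hk => by rw [hrest k hk])
    rw [hP, hcx]
    have hfac : (List.count x l - 1).factorial * List.count x l = (List.count x l).factorial := by
      have h2 : List.count x l = (List.count x l - 1) + 1 := by omega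
      rw [h2]; simp [Nat.factorial_succ]; ring
    rw [← hfac]; ring

lemma Mm_key {l : List Int} {x : Int} (hx : x ∈ l) :
    Mm l * List.count x l = l.length * Mm (l.erase x) := by
  have hlen : (l.erase x).length = l.length - 1 := List.length_erase_of_mem hx
  have hlpos : 0 < l.length := List.length_pos_of_mem hx
  have key : (Mm l * List.count x l) * Fct (l.erase x)
      = (l.length * Mm (l.erase x)) * Fct (l.erase x) := by
    calc (Mm l * List.count x l) * Fct (l.erase x)
        = Mm l * (Fct (l.erase x) * List.count x l) := by ring
      _ = Mm l * Fct l := by rw [← Fct_erase hx]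
      _ = l.length.factorial := Mm_mul_Fct l
      _ = l.length * (l.length - 1).factorial := by
            rw [← Nat.succ_pred_eq_of_pos hlpos, Nat.factorial_succ]; simp
      _ = l.length * ((l.erase x).length.factorial) := by rw [hlen]
      _ = (l.length * Mm (l.erase x)) * Fct (l.erase x) := by
            rw [← Mm_mul_Fct (l.erase x)]; ring
  exact Nat.eq_of_mul_eq_mul_right (Fct_pos _) key


-- ---- A side ----

def chooseProd : Nat → List Nat → Nat
  | _, [] => 1
  | s, c :: cs => Nat.choose s c * chooseProd (s - c) cs

lemma chooseProd_spec : ∀ (cs : List Nat) (s : Nat), cs.sum = s →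
    chooseProd s cs * (cs.map Nat.factorial).prod = s.factorial := by
  intro cs
  induction cs with
  | nil => intro s hs; simp at hs; subst hs; simp [chooseProd]
  | cons c cs ih =>
    intro s hs
    simp only [List.sum_cons] at hs
    have hcs : cs.sum = s - c := by omega
    have hcle : c ≤ s := by omega
    have hih := ih (s - c) hcs
    simp only [chooseProd, List.map_cons, List.prod_cons]
    calc Nat.choose s c * chooseProd (s - c) cs * (c.factorial * (cs.map Nat.factorial).prod)
        = Nat.choose s c * c.factorial * (chooseProd (s - c) cs * (cs.map Nat.factorial).prod) := by ring
      _ = Nat.choose s c * c.factorial * (s - c).factorial := by rw [hih]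
      _ = s.factorial := Nat.choose_mul_factorial_mul_factorial hcle

lemma foldA (cs : List Nat) : ∀ (r s : Nat), cs.sum ≤ s →
    ((cs.map (fun (c : Nat) => (c : Int))).foldl (fun (st : Int × Int) v =>
      (st.1 * ((Nat.choose st.2.toNat v.toNat : Nat) : Int), st.2 - v)) ((r : Int), (s : Int)))
    = (((r * chooseProd s cs : Nat) : Int), ((s - cs.sum : Nat) : Int)) := by
  induction cs with
  | nil => intro r s _; simp [chooseProd]
  | cons c cs ih =>
    intro r s hle0
    have hle : c + cs.sum ≤ s := by rw [List.sum_cons] at hle0; exact hle0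
    simp only [List.map_cons, List.foldl_cons]
    have h1 : ((s : Int)).toNat = s := by simp
    have h2 : ((c : Int)).toNat = c := by simp
    rw [h1, h2]
    have hsub : (s : Int) - (c : Int) = ((s - c : Nat) : Int) := by
      have : c ≤ s := by omega
      omega
    have hmul : ((r : Int) * ((Nat.choose s c : Nat) : Int)) = ((r * Nat.choose s c : Nat) : Int) := by
      push_cast; ring
    rw [hsub, hmul, ih (r * Nat.choose s c) (s - c) (by omega)]
    have e1 : r * Nat.choose s c * chooseProd (s - c) cs = r * chooseProd s (c :: cs) := by
      simp [chooseProd]; ring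
    have e2 : s - c - cs.sum = s - (c :: cs).sum := by simp; omega
    rw [e1, e2]

lemma ofList_toFinset (l : List Int) : (PySem.Set.ofList l).toFinset = l.toFinset := by
  ext k; simp [PySem.Set.mem_ofList]

lemma permA_eq (l : List Int) : permA l = (Mm l : Int) := by
  show (List.foldl (fun (st : Int × Int) v => (st.1 * ((Nat.choose st.2.toNat v.toNat : Nat) : Int), st.2 - v)) (1, (l.length : Int)) (PySem.Dict.counter l).values).1 = (Mm l : Int)
  have hitems := PySem.Dict.items_counter l
  have hvals : (PySem.Dict.counter l).values
      = ((PySem.Set.ofList l).map (fun k => List.count k l)).map (fun (c : Nat) => (c : Int)) := by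
    rw [PySem.Dict.values, hitems, List.map_map, List.map_map]
    rfl
  have hnd : (PySem.Set.ofList l).Nodup := PySem.Set.nodup_ofList l
  have hsum : ((PySem.Set.ofList l).map (fun k => List.count k l)).sum = l.length := by
    rw [← List.sum_toFinset _ hnd, ofList_toFinset, List.sum_toFinset_count_eq_length]
  have hprod : (((PySem.Set.ofList l).map (fun k => List.count k l)).map Nat.factorial).prod
      = Fct l := by
    rw [List.map_map, ← List.prod_toFinset _ hnd, ofList_toFinset]
    rfl
  rw [hvals]
  conv_lhs => rw [show (1 : Int) = ((1 : Nat) : Int) by norm_num]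
  rw [foldA _ 1 l.length (by rw [hsum])]
  simp only [one_mul]
  congr 1
  have h1 := chooseProd_spec _ _ hsum
  rw [hprod] at h1
  have h2 := Mm_mul_Fct l
  exact Nat.eq_of_mul_eq_mul_right (Fct_pos l) (h1.trans h2.symm)

lemma A_loop (x : Int) (rec : Option Int) :
    ∀ (ks : List Int) (acc : Int) (arrTmp s : List Int),
    arrTmp.Perm s → ks.Pairwise (· < ·) → x ∈ ks → (∀ k ∈ ks, k ∈ s) →
    getIdxLoopA x rec ks acc arrTmp =
      rec.map (fun r => acc +
        (((ks.filter (fun k => decide (k < x))).map (fun k => (Mm (s.erase k) : Int))).sum) + r) := by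
  intro ks
  induction ks with
  | nil => intro acc arrTmp s _ _ hx _; simp at hx
  | cons k ks ih =>
    intro acc arrTmp s hperm hpw hx hmem
    rw [List.pairwise_cons] at hpw
    obtain ⟨hk, hpw'⟩ := hpw
    by_cases hlt : k < x
    · have hkS : k ∈ s := hmem k (by simp)
      have hkT : k ∈ arrTmp := hperm.mem_iff.mpr hkS
      have hrem := PySem.List.remove?_eq_some_erase arrTmp k hkT
      simp only [getIdxLoopA, if_pos hlt, hrem]
      have hxk : x ∈ ks := by
        rcases List.mem_cons.mp hx with h | h
        · exact absurd h.symm (ne_of_lt hlt)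
        · exact h
      have hperm' : (arrTmp.erase k ++ [k]).Perm s :=
        ((List.perm_append_singleton k (arrTmp.erase k)).trans
          (List.perm_cons_erase hkT).symm).trans hperm
      rw [ih (acc + permA (arrTmp.erase k)) (arrTmp.erase k ++ [k]) s hperm' hpw' hxk
          (fun y hy => hmem y (by simp [hy]))]
      have hpA : permA (arrTmp.erase k) = (Mm (s.erase k) : Int) := by
        rw [permA_eq, Mm_perm (hperm.erase k)]
      rw [hpA]
      have hfil : (k :: ks).filter (fun y => decide (y < x)) = k :: ks.filter (fun y => decide (y < x)) := by
        simp [hlt]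
      rw [hfil]
      congr 1
      funext r
      simp only [List.map_cons, List.sum_cons]
      ring
    · by_cases heq : k = x
      · subst heq
        simp only [getIdxLoopA, if_neg hlt]
        have hfil : (k :: ks).filter (fun y => decide (y < k)) = [] := by
          rw [List.filter_cons]
          simp only [decide_eq_true_eq]
          rw [if_neg (lt_irrefl k), List.filter_eq_nil_iff]
          intro a ha
          simp only [decide_eq_true_eq]
          exact not_lt_of_gt (hk a ha)
        rw [hfil]
        simp
      · have hxk : x ∈ ks := by
          rcases List.mem_cons.mp hx with h | h
          · exact absurd h.symm heq
          · exact h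
        exact absurd (hk x hxk) (by omega)

lemma A_main (arr : List Int) : ∀ (fuel idx : Nat), arr.length - idx < fuel → idx ≤ arr.length →
    getIdxPermA arr fuel idx = some ((1 + contribSum (arr.drop idx) : Nat) : Int) := by
  intro fuel
  induction fuel with
  | zero => intro idx h _; omega
  | succ fuel ih =>
    intro idx hfuel hle
    by_cases hidx : idx = arr.length
    · subst hidx
      simp [getIdxPermA, List.drop_length, contribSum]
    · have hlt : idx < arr.length := by omega
      have hget : PySem.List.pyGet? arr (idx : Int) = some arr[idx] := by
        rw [PySem.List.pyGet?_natCast, List.getElem?_eq_getElem hlt]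
      simp only [getIdxPermA, if_neg hidx, hget, PySem.List.slice_from_natCast]
      set x := arr[idx] with hxdef
      set s := arr.drop idx with hsdef
      set t := arr.drop (idx+1) with htdef
      have hdrop : s = x :: t := List.drop_eq_getElem_cons hlt
      have hrec := ih (idx+1) (by omega) (by omega)
      set ks := PySem.List.sorted (PySem.Set.ofList s) (fun y => y) false with hksdef
      have hpw : ks.Pairwise (· < ·) := PySem.List.sorted_ofList_pairwise_lt s
      have hmemks : ∀ k, k ∈ ks ↔ k ∈ s := by
        intro k
        rw [hksdef, PySem.List.mem_sorted, PySem.Set.mem_ofList]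
      have hxks : x ∈ ks := (hmemks x).mpr (by rw [hdrop]; simp)
      rw [A_loop x _ ks 0 s s (List.Perm.refl s) hpw hxks (fun k hk => (hmemks k).mp hk)]
      rw [hrec]
      simp only [Option.map_some]
      congr 1
      have hnd : ks.Nodup := hpw.imp ne_of_lt
      have hndf : (ks.filter (fun k => decide (k < x))).Nodup := hnd.filter _
      have htfs : (ks.filter (fun k => decide (k < x))).toFinset
          = s.toFinset.filter (fun k => k < x) := by
        ext k
        simp only [List.mem_toFinset, List.mem_filter, Finset.mem_filter, decide_eq_true_eq,
          hmemks]
      have hsum : ((ks.filter (fun k => decide (k < x))).map (fun k => (Mm (s.erase k) : Int))).sum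
          = ((∑ k ∈ s.toFinset.filter (fun k => k < x), Mm (s.erase k) : Nat) : Int) := by
        rw [← List.sum_toFinset _ hndf, htfs]
        push_cast
        rfl
      rw [hsum, hdrop]
      show (0 : Int) + _ + _ = _
      rw [contribSum]
      push_cast
      ring

lemma A_val (arr : List Int) :
    fromPermutaionGetKth arr = ((1 + contribSum arr : Nat) : Int) := by
  unfold fromPermutaionGetKth
  rw [A_main arr (arr.length + 1) 0 (by omega) (by omega)]
  simp

-- ---- B side ----

lemma get?_items_map (D : List Int) (f : Int → Int) (d : PySem.Dict Int Int)
    (hitems : d.items = D.map (fun k => (k, f k))) (x : Int) :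
    d.get? x = if x ∈ D then some (f x) else none := by
  rw [PySem.Dict.get?, hitems]
  clear hitems
  induction D with
  | nil => simp
  | cons k D ih =>
    simp only [List.map_cons, List.find?_cons]
    by_cases hk : k = x
    · subst hk
      simp
    · have : ((k, f k).1 == x) = false := by simpa using hk
      rw [this]
      rw [ih]
      by_cases hx : x ∈ D <;> simp [hx, Ne.symm hk]

lemma foldDiv : ∀ (cs : List Nat) (N : Nat),
    (cs.map (fun (c : Nat) => (c : Int))).foldl
      (fun t v => PySem.Int.floordiv t ((Nat.factorial v.toNat : Nat) : Int)) ((N : Nat) : Int)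
    = ((N / (cs.map Nat.factorial).prod : Nat) : Int) := by
  intro cs
  induction cs with
  | nil => intro N; simp
  | cons c cs ih =>
    intro N
    simp only [List.map_cons, List.foldl_cons]
    have h2 : ((c : Int)).toNat = c := by simp
    rw [h2, PySem.Int.floordiv_natCast, ih]
    rw [List.prod_cons, Nat.div_div_eq_div_mul]

lemma smaller_sum (D : List Int) (s : List Int) (x : Int) (hnd : D.Nodup)
    (hmem : ∀ k ∈ s, k ∈ D) :
    Mm s * ((D.filter (fun k => decide (k < x))).map (fun k => List.count k s)).sum
      = s.length * ∑ k ∈ s.toFinset.filter (fun k => k < x), Mm (s.erase k) := by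
  have hndf : (D.filter (fun k => decide (k < x))).Nodup := hnd.filter _
  have htfs : (D.filter (fun k => decide (k < x))).toFinset
      = D.toFinset.filter (fun k => k < x) := by
    ext k; simp
  rw [← List.sum_toFinset _ hndf, htfs, Finset.mul_sum]
  have hsub : s.toFinset.filter (fun k => k < x) ⊆ D.toFinset.filter (fun k => k < x) := by
    intro k hk
    simp only [Finset.mem_filter, List.mem_toFinset] at hk ⊢
    exact ⟨hmem k hk.1, hk.2⟩
  rw [← Finset.sum_subset hsub (by
    intro k hkD hkS
    simp only [Finset.mem_filter, List.mem_toFinset] at hkD hkS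
    have : k ∉ s := fun h => hkS ⟨h, hkD.2⟩
    rw [List.count_eq_zero_of_not_mem this, mul_zero])]
  rw [Finset.mul_sum]
  refine Finset.sum_congr rfl (fun k hk => ?_)
  simp only [Finset.mem_filter, List.mem_toFinset] at hk
  exact Mm_key hk.1

lemma B_loop (D : List Int) (hnd : D.Nodup) :
    ∀ (s : List Int) (rank : Int) (cnt : PySem.Dict Int Int),
    (∀ k ∈ s, k ∈ D) →
    cnt.items = D.map (fun k => (k, (List.count k s : Int))) →
    (s.foldl stepB (rank, (Mm s : Int), (s.length : Int), cnt)).1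
      = rank + (contribSum s : Int) := by
  intro s
  induction s with
  | nil => intro rank cnt _ _; simp [contribSum]
  | cons x t ih =>
    intro rank cnt hmem hitems
    have hxD : x ∈ D := hmem x (by simp)
    have hlen : (x :: t).length = t.length + 1 := rfl
    -- the smaller-sum
    have hsm : cnt.items.foldl (fun acc p => if p.1 < x then acc + p.2 else acc) 0
        = ((((D.filter (fun k => decide (k < x))).map (fun k => List.count k (x :: t))).sum : Nat) : Int) := by
      rw [PySem.List.foldl_ite_eq_foldl_filter (p := fun p : Int × Int => p.1 < x)
        (f := fun acc p => acc + p.2)]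
      rw [PySem.List.foldl_add (g := fun p : Int × Int => p.2)]
      rw [hitems, List.filter_map, List.map_map]
      have : ((fun p : Int × Int => decide (p.1 < x)) ∘ fun k => (k, (List.count k (x :: t) : Int)))
          = fun k => decide (k < x) := rfl
      rw [this]
      simp [Function.comp_def, Nat.cast_list_sum, List.map_map]
    set Cx := ∑ k ∈ (x::t).toFinset.filter (fun k => k < x), Mm ((x::t).erase k) with hCx
    set Sc := ((D.filter (fun k => decide (k < x))).map (fun k => List.count k (x :: t))).sum with hSc
    have hlpos : 0 < (x :: t).length := by simp
    have hgetq := get?_items_map D (fun k => (List.count k (x :: t) : Int)) cnt hitems x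
    have hget : cnt.getD x 0 = (List.count x (x :: t) : Int) := by
      rw [PySem.Dict.getD, hgetq, if_pos hxD]
      rfl
    have hcontains : cnt.contains x = true := by
      rw [PySem.Dict.contains_eq_isSome_get?, hgetq, if_pos hxD]
      rfl
    have hcnt' : (cnt.modify x 0 (fun c => c - 1)).items
        = D.map (fun k => (k, (List.count k t : Int))) := by
      rw [PySem.Dict.modify, hget]
      rw [PySem.Dict.insert]
      rw [if_pos hcontains]
      show (cnt.items.map _) = _
      rw [hitems, List.map_map]
      refine List.map_congr_left (fun k hkD => ?_)
      by_cases hk : k = x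
      · subst hk
        have : List.count k (k :: t) = List.count k t + 1 := List.count_cons_self ..
        simp only [Function.comp_apply, beq_self_eq_true, if_pos]
        rw [this]
        push_cast
        simp
      · have hbeq : (k == x) = false := by simpa using hk
        simp only [Function.comp_apply, hbeq, if_neg, Bool.false_eq_true, not_false_iff]
        simp [List.count_cons]
        exact fun h => hk h.symm
    have hkey := smaller_sum D (x :: t) x hnd hmem
    rw [← hSc, ← hCx] at hkey
    have hrankc : PySem.Int.floordiv (((Mm (x :: t) : Nat) : Int) * ((Sc : Nat) : Int))
        (((x :: t).length : Nat) : Int) = ((Cx : Nat) : Int) := by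
      have h1 : ((Mm (x :: t) : Nat) : Int) * ((Sc : Nat) : Int) = ((Mm (x :: t) * Sc : Nat) : Int) := by
        push_cast; ring
      rw [h1, PySem.Int.floordiv_natCast, hkey, Nat.mul_div_cancel_left _ hlpos]
    have htotc : PySem.Int.floordiv (((Mm (x :: t) : Nat) : Int) * ((List.count x (x :: t) : Nat) : Int))
        (((x :: t).length : Nat) : Int) = ((Mm t : Nat) : Int) := by
      have h1 : ((Mm (x :: t) : Nat) : Int) * ((List.count x (x :: t) : Nat) : Int)
          = ((Mm (x :: t) * List.count x (x :: t) : Nat) : Int) := by push_cast; ring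
      rw [h1, PySem.Int.floordiv_natCast]
      rw [Mm_key (l := x :: t) (x := x) (by simp)]
      rw [List.erase_cons_head, Nat.mul_div_cancel_left _ hlpos]
    have hmc : (((x :: t).length : Nat) : Int) - 1 = ((t.length : Nat) : Int) := by
      rw [hlen]; push_cast; ring
    have hstep : stepB (rank, ((Mm (x :: t) : Nat) : Int), (((x :: t).length : Nat) : Int), cnt) x
        = (rank + ((Cx : Nat) : Int), ((Mm t : Nat) : Int), ((t.length : Nat) : Int),
           cnt.modify x 0 (fun c => c - 1)) := by
      show (rank + PySem.Int.floordiv (((Mm (x :: t) : Nat) : Int) * _) _, _, _, _) = _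
      rw [hsm, hget, hrankc, htotc, hmc]
    rw [List.foldl_cons, hstep]
    rw [ih (rank + ((Cx : Nat) : Int)) (cnt.modify x 0 (fun c => c - 1))
        (fun k hk => hmem k (by simp [hk])) hcnt']
    have : contribSum (x :: t) = Cx + contribSum t := by rw [contribSum]
    rw [this]
    push_cast
    ring

lemma B_val (arr : List Int) :
    fromPermutaionGetKth_alt arr = ((1 + contribSum arr : Nat) : Int) := by
  show ((arr.foldl stepB (1,
      (PySem.Dict.counter arr).values.foldl
        (fun t v => PySem.Int.floordiv t ((Nat.factorial v.toNat : Nat) : Int))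
        ((Nat.factorial arr.length : Nat) : Int),
      (arr.length : Int), PySem.Dict.counter arr)).1) = _
  have hitems := PySem.Dict.items_counter arr
  have hvals : (PySem.Dict.counter arr).values
      = ((PySem.Set.ofList arr).map (fun k => List.count k arr)).map (fun (c : Nat) => (c : Int)) := by
    rw [PySem.Dict.values, hitems, List.map_map, List.map_map]
    rfl
  have hnd : (PySem.Set.ofList arr).Nodup := PySem.Set.nodup_ofList arr
  have hprod : (((PySem.Set.ofList arr).map (fun k => List.count k arr)).map Nat.factorial).prod
      = Fct arr := by
    rw [List.map_map, ← List.prod_toFinset _ hnd, ofList_toFinset]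
    rfl
  have htot : (PySem.Dict.counter arr).values.foldl
      (fun t v => PySem.Int.floordiv t ((Nat.factorial v.toNat : Nat) : Int))
      ((Nat.factorial arr.length : Nat) : Int) = ((Mm arr : Nat) : Int) := by
    rw [hvals, foldDiv, hprod]
    rfl
  rw [htot]
  have h1 : (1 : Int) = ((1 : Nat) : Int) := by norm_num
  rw [h1]
  rw [B_loop (PySem.Set.ofList arr) hnd arr ((1 : Nat) : Int) (PySem.Dict.counter arr)
      (fun k hk => (PySem.Set.mem_ofList arr k).mpr hk) hitems]
  push_cast
  ring

-- ===== VERDICT (by name: the statement is the Claim_ definition above) =====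
theorem fromPermutaionGetKth_spec : Claim_equal_fromPermutaionGetKth := by
  intro arr _
  unfold Spec_fromPermutaionGetKth
  rw [A_val, B_val]
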